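-- pv_equiv track=rewrite | github.com/janosh/bayes-mndo | src/mndo.py | get_indices
-- ===== SOURCE A (Python) =====
-- def get_indices(lines, pattern, stop_pattern=None):
--
--     idxs = []
--
--     for i, line in enumerate(lines):
--         if pattern in line:
--             idxs.append(i)
--             continue
--
--         if stop_pattern and stop_pattern in line:
--             break
--
--     return idxs
-- ===== SOURCE B (Python) =====
-- def get_indices(lines, pattern, stop_pattern=None):
--     # Two-phase: find the cutoff (first stopping line), then filter indices up to it.
--     cutoff = len(lines)
--     if stop_pattern:
--         for i, line in enumerate(lines):
--             if stop_pattern in line and pattern not in line: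
--                 cutoff = i
--                 break
--     return [i for i in range(cutoff) if pattern in lines[i]]
-- ===== Notes on version B (the rewrite author's own statement) =====
-- stated objective: alternative
-- what changed: Replaces A's single fused loop (append-or-break with continue) by a two-phase decomposition: first compute the cutoff index of the first line that triggers the stop (stop_pattern present, pattern absent), then a separate filtering pass collects the matching indices below the cutoff.
import Mathlib
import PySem

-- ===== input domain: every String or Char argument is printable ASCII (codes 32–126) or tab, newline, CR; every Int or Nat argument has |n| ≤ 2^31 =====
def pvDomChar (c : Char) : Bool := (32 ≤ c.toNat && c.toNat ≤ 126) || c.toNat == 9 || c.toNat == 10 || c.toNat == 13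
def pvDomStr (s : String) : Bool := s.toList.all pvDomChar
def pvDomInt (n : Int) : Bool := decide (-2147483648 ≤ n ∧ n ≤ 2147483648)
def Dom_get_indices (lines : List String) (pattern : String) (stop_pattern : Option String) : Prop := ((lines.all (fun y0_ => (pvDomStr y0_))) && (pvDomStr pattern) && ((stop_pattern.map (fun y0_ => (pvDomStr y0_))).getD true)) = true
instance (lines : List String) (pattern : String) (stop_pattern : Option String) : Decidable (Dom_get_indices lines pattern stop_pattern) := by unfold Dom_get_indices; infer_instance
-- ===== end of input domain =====

-- B computes the same indices as A via a two-phase decomposition (cutoff index first, then a filtering pass); return values proved equal on all inputs.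

-- ===== PORT A =====
-- truthiness of the optional stop_pattern ('if stop_pattern ...': None and "" are falsy)
def pvTruthy (stop_pattern : Option String) : Bool :=
  match stop_pattern with
  | none => false
  | some s => s ≠ ""

-- A's fused loop: append on pattern match (continue), break on stop match
def getIndicesAuxA (lines : List String) (pattern : String) (stop_pattern : Option String) (i : Int) : List Int :=
  match lines with
  | [] => []
  | l :: rest =>
    if PySem.Str.isIn pattern l then
      i :: getIndicesAuxA rest pattern stop_pattern (i + 1)
    else if pvTruthy stop_pattern && PySem.Str.isIn (stop_pattern.getD "") l then
      []
    else
      getIndicesAuxA rest pattern stop_pattern (i + 1)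

def get_indices (lines : List String) (pattern : String) (stop_pattern : Option String) : List Int :=
  getIndicesAuxA lines pattern stop_pattern 0

-- ===== PORT B =====
-- Source B's cutoff loop: index of the first line with stop_pattern in it and pattern not in it (default: len(lines))
def cutoffAux (lines : List String) (pattern s : String) : Nat :=
  match lines with
  | [] => 0
  | l :: rest =>
    if PySem.Str.isIn s l && !(PySem.Str.isIn pattern l) then 0
    else 1 + cutoffAux rest pattern s

def get_indices_alt (lines : List String) (pattern : String) (stop_pattern : Option String) : List Int :=
  let cutoff : Nat :=
    match stop_pattern with
    | some s => if s ≠ "" then cutoffAux lines pattern s else lines.length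
    | none => lines.length
  ((List.range cutoff).filter (fun i => PySem.Str.isIn pattern (lines.getD i ""))).map (fun i => Int.ofNat i)

-- ===== PRECONDITION & SPEC =====
def Spec_get_indices (lines : List String) (pattern : String) (stop_pattern : Option String) (out : List Int) : Prop := out = get_indices_alt lines pattern stop_pattern
instance (lines : List String) (pattern : String) (stop_pattern : Option String) (out : List Int) : Decidable (Spec_get_indices lines pattern stop_pattern out) := by unfold Spec_get_indices; infer_instance

-- ===== CLAIM (what is proved, stated in full; the proofs are below) =====
def Claim_equal_get_indices : Prop := ∀ (lines : List String) (pattern : String) (stop_pattern : Option String), Dom_get_indices lines pattern stop_pattern → Spec_get_indices lines pattern stop_pattern (get_indices lines pattern stop_pattern)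

-- ===== LEMMAS AND PROOFS =====

-- generic shape of B's pass, relative indices shifted by i (stated at the Chars level)
def bShape (lines : List String) (pattern : String) (c : Nat) (i : Int) : List Int :=
  ((List.range c).filter (fun k => PySem.Chars.isIn pattern.toList (lines.getD k "").toList)).map
    (fun k => i + Int.ofNat k)

theorem filter_range_succ (p : Nat → Bool) (c : Nat) :
    (List.range (c + 1)).filter p
      = (if p 0 then [0] else []) ++ (((List.range c).filter (fun k => p (k + 1))).map (· + 1)) := by
  rw [List.range_succ_eq_map, List.filter_cons, List.filter_map]
  split_ifs with h
  · simp [Function.comp_def, Nat.succ_eq_add_one]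
  · simp [Function.comp_def, Nat.succ_eq_add_one]

theorem bShape_cons (l : String) (rest : List String) (pattern : String) (c : Nat) (i : Int) :
    bShape (l :: rest) pattern (c + 1) i =
      (if PySem.Chars.isIn pattern.toList l.toList then [i] else []) ++ bShape rest pattern c (i + 1) := by
  unfold bShape
  rw [filter_range_succ, List.map_append, List.map_map]
  congr 1
  · by_cases h : PySem.Chars.isIn pattern.toList l.toList = true <;> simp [h]
  · simp only [Function.comp_def, List.getD_cons_succ]
    apply List.map_congr_left
    intro k _
    simp only [Int.ofNat_eq_natCast]
    push_cast
    ring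

theorem auxA_eq_bShape_truthy (pattern s : String) (hs : s ≠ "") :
    ∀ (lines : List String) (i : Int),
      getIndicesAuxA lines pattern (some s) i = bShape lines pattern (cutoffAux lines pattern s) i := by
  intro lines
  induction lines with
  | nil => intro i; simp [getIndicesAuxA, cutoffAux, bShape]
  | cons l rest ih =>
    intro i
    unfold getIndicesAuxA cutoffAux
    simp only [PySem.Str.isIn_eq, Option.getD_some, pvTruthy, ne_eq, hs, not_false_eq_true,
      decide_true, Bool.true_and]
    by_cases hp : PySem.Chars.isIn pattern.toList l.toList = true
    · rw [if_pos hp, if_neg (by simp [hp]), Nat.add_comm 1, bShape_cons, if_pos hp, ih]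
      rfl
    · rw [if_neg hp]
      by_cases hstop : PySem.Chars.isIn s.toList l.toList = true
      · rw [if_pos hstop, if_pos (by simp [hstop, hp])]
        simp [bShape]
      · rw [if_neg hstop, if_neg (by simp [hstop]), Nat.add_comm 1, bShape_cons, if_neg hp, ih]
        rfl

theorem auxA_eq_bShape_falsy (pattern : String) (stop_pattern : Option String)
    (hf : pvTruthy stop_pattern = false) :
    ∀ (lines : List String) (i : Int),
      getIndicesAuxA lines pattern stop_pattern i = bShape lines pattern lines.length i := by
  intro lines
  induction lines with
  | nil => intro i; simp [getIndicesAuxA, bShape]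
  | cons l rest ih =>
    intro i
    unfold getIndicesAuxA
    rw [List.length_cons, bShape_cons]
    simp only [PySem.Str.isIn_eq, hf, Bool.false_and, Bool.false_eq_true, if_false]
    by_cases hp : PySem.Chars.isIn pattern.toList l.toList = true
    · rw [if_pos hp, if_pos hp, ih]
      rfl
    · rw [if_neg hp, if_neg hp, ih]
      rfl

theorem alt_eq_bShape (lines : List String) (pattern : String) (stop_pattern : Option String) :
    get_indices_alt lines pattern stop_pattern =
      bShape lines pattern
        (match stop_pattern with
         | some s => if s ≠ "" then cutoffAux lines pattern s else lines.length
         | none => lines.length) 0 := by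
  unfold get_indices_alt bShape
  simp [PySem.Str.isIn_eq]

-- ===== VERDICT (by name: the statement is the Claim_ definition above) =====
theorem get_indices_spec : Claim_equal_get_indices := by
  intro lines pattern stop_pattern _
  unfold Spec_get_indices get_indices
  rw [alt_eq_bShape]
  match stop_pattern with
  | none => exact auxA_eq_bShape_falsy pattern none rfl lines 0
  | some s =>
    have hm : (match some s with
               | some s => if s ≠ "" then cutoffAux lines pattern s else lines.length
               | none => lines.length) = if s ≠ "" then cutoffAux lines pattern s else lines.length := rfl
    rw [hm]
    by_cases hs : s = ""
    · subst hs
      rw [if_neg (by simp)]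
      exact auxA_eq_bShape_falsy pattern (some "") rfl lines 0
    · rw [if_pos hs]
      exact auxA_eq_bShape_truthy pattern s hs lines 0
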